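-- pv_equiv track=rewrite | github.com/aastrand/aoc2023 | utils/graph.py | bfs
-- ===== SOURCE A (Python) =====
-- def bfs(start, graph, visitor=lambda n: ()):
--     visited = set()
--     q = []
--
--     q.append(start)
--     visited.add(start)
--
--     while len(q) > 0:
--         cur = q.pop(0)
--         visitor(cur)
--         for n in graph.get(cur, []):
--             if n not in visited:
--                 q.append(n)
--                 visited.add(n)
--
--     return visited
-- ===== SOURCE B (Python) =====
-- def bfs(start, graph, visitor=lambda n: ()):
--     # Fixpoint/closure iteration: repeatedly rescan the discovery list and add
--     # unseen neighbors until a full pass adds nothing; visitor fires once per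
--     # node in the same discovery (BFS) order as a queue-based BFS.
--     order = [start]
--     seen = {start}
--     changed = True
--     while changed:
--         changed = False
--         for cur in list(order):
--             for n in graph.get(cur, []):
--                 if n not in seen:
--                     seen.add(n)
--                     order.append(n)
--                     changed = True
--     for cur in order:
--         visitor(cur)
--     return seen
-- ===== Notes on version B (the rewrite author's own statement) =====
-- stated objective: alternative
-- what changed: BFS via a single FIFO queue is replaced by fixpoint (closure) iteration: B repeatedly rescans the whole discovery list, appending unseen neighbors, until a full pass adds nothing; this yields the identical visited set (and the same first-discovery order, so visitor fires once per node in the same order, deferred to after the loop).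
import Mathlib
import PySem

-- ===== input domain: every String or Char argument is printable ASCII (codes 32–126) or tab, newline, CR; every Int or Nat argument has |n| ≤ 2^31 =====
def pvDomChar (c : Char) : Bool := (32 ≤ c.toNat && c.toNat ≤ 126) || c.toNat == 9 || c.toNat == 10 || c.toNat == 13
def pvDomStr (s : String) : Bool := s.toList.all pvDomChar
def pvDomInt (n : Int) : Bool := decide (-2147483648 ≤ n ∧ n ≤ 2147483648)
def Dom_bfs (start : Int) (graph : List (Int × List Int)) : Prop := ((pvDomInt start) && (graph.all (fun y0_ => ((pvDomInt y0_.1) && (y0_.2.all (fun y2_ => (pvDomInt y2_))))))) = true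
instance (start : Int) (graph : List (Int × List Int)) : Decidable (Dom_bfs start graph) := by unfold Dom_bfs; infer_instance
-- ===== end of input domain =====

-- B replaces the single-FIFO-queue BFS by fixpoint (closure) iteration — rescan the whole
-- discovery list until a pass adds nothing — returning the same visited set; no speed claim.
-- The Python 'visitor' side effect is out of scope; equivalence is about the return value
-- (both call visitor once per node in the same order, checked in Python but not modelled here).

-- shared helpers: graph.get(cur, []) and termination bookkeeping (cited by both ports'
-- decreasing_by proofs, so they must precede the ports)
def pvNbrs (graph : List (Int × List Int)) (cur : Int) : List Int :=
  PySem.Dict.getD (PySem.Dict.mk graph) cur []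

-- universe of all possible discoveries (termination bookkeeping only)
def pvU (graph : List (Int × List Int)) : Finset Int := (graph.flatMap Prod.snd).toFinset

lemma pvNbrs_mem_U (graph : List (Int × List Int)) (c x : Int) (hx : x ∈ pvNbrs graph c) :
    x ∈ pvU graph := by
  unfold pvNbrs PySem.Dict.getD PySem.Dict.get? at hx
  cases hfind : List.find? (fun p => p.1 == c) (PySem.Dict.mk graph).items with
  | none => rw [hfind] at hx; simp at hx
  | some p =>
      rw [hfind] at hx; simp at hx
      have hp : p ∈ graph := List.mem_of_find?_eq_some hfind
      simp only [pvU, List.mem_toFinset, List.mem_flatMap]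
      exact ⟨p, hp, hx⟩

-- the elements an inner 'for n in ns: if n not in v: …' scan newly discovers (proof/termination
-- bookkeeping: both ports' loops add exactly these, in this order)
def newsOf : List Int → PySem.Set Int → List Int
  | [], _ => []
  | n :: ns, v =>
      if PySem.Set.contains v n then newsOf ns v else n :: newsOf ns (PySem.Set.add v n)

lemma newsOf_spec (ns : List Int) : ∀ (v : PySem.Set Int),
    (newsOf ns v).Nodup ∧ (∀ x ∈ newsOf ns v, x ∈ ns) ∧ (∀ x ∈ newsOf ns v, x ∉ v) ∧
      (∀ x ∈ ns, x ∈ v ++ newsOf ns v) := by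
  induction ns with
  | nil => intro v; simp [newsOf]
  | cons n ns ih =>
      intro v
      by_cases h : n ∈ v
      · obtain ⟨hnd, hmem, hfr, hcov⟩ := ih v
        refine ⟨?_, ?_, ?_, ?_⟩
        · simpa [newsOf, h] using hnd
        · intro x hx; rw [newsOf, if_pos (by simpa using h)] at hx
          exact List.mem_cons_of_mem _ (hmem x hx)
        · intro x hx; rw [newsOf, if_pos (by simpa using h)] at hx; exact hfr x hx
        · intro x hx
          rw [newsOf, if_pos (by simpa using h)]
          rcases List.mem_cons.mp hx with rfl | hx
          · exact List.mem_append.mpr (Or.inl h)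
          · exact hcov x hx
      · obtain ⟨hnd, hmem, hfr, hcov⟩ := ih (v ++ [n])
        have hadd : PySem.Set.add v n = v ++ [n] := PySem.Set.add_of_not_mem h
        have hrw : newsOf (n :: ns) v = n :: newsOf ns (v ++ [n]) := by
          rw [newsOf, if_neg (by simpa using h), hadd]
        refine ⟨?_, ?_, ?_, ?_⟩
        · rw [hrw]
          exact List.nodup_cons.mpr ⟨fun hn => (hfr n hn) (by simp), hnd⟩
        · intro x hx; rw [hrw] at hx
          rcases List.mem_cons.mp hx with rfl | hx
          · exact List.mem_cons_self
          · exact List.mem_cons_of_mem _ (hmem x hx)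
        · intro x hx hxv; rw [hrw] at hx
          rcases List.mem_cons.mp hx with rfl | hx
          · exact h hxv
          · exact hfr x hx (by simp [hxv])
        · intro x hx
          rw [hrw]
          rcases List.mem_cons.mp hx with rfl | hx
          · simp
          · have := hcov x hx; simp at this ⊢; tauto

-- one cheap counting fact used only for termination of the two loops
lemma pvCardStep {U : Finset Int} {v news : List Int} (hnd : news.Nodup)
    (hfr : ∀ x ∈ news, x ∉ v) (hsub : ∀ x ∈ news, x ∈ U) :
    (U \ (v ++ news).toFinset).card + news.length = (U \ v.toFinset).card := by
  have hss : news.toFinset ⊆ U \ v.toFinset := by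
    intro x hx
    have hx' : x ∈ news := List.mem_toFinset.mp hx
    exact Finset.mem_sdiff.mpr ⟨hsub x hx', fun hv => hfr x hx' (List.mem_toFinset.mp hv)⟩
  have h1 : U \ (v ++ news).toFinset = (U \ v.toFinset) \ news.toFinset := by
    ext x; simp [List.toFinset_append]; tauto
  have h2 := Finset.card_le_card hss
  rw [h1, Finset.card_sdiff, Finset.inter_eq_left.mpr hss, List.toFinset_card_of_nodup hnd]
  rw [List.toFinset_card_of_nodup hnd] at h2
  omega

-- ===== PORT A =====
-- inner 'for n in graph.get(cur, []): if n not in visited: q.append(n); visited.add(n)'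
def bfsPush (ns : List Int) (q : List Int) (visited : PySem.Set Int) :
    List Int × PySem.Set Int :=
  match ns with
  | [] => (q, visited)
  | n :: ns =>
      if PySem.Set.contains visited n then bfsPush ns q visited
      else bfsPush ns (q ++ [n]) (PySem.Set.add visited n)

lemma bfsPush_eq (ns : List Int) : ∀ (q : List Int) (v : PySem.Set Int),
    bfsPush ns q v = (q ++ newsOf ns v, v ++ newsOf ns v) := by
  induction ns with
  | nil => intro q v; simp [bfsPush, newsOf]
  | cons n ns ih =>
      intro q v
      by_cases h : n ∈ v
      · rw [show bfsPush (n :: ns) q v = bfsPush ns q v from by simp [bfsPush, h],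
            show newsOf (n :: ns) v = newsOf ns v from by simp [newsOf, h]]
        exact ih q v
      · have hadd : PySem.Set.add v n = v ++ [n] := PySem.Set.add_of_not_mem h
        rw [show bfsPush (n :: ns) q v = bfsPush ns (q ++ [n]) (v ++ [n]) from by
              simp [bfsPush, h],
            show newsOf (n :: ns) v = n :: newsOf ns (v ++ [n]) from by rw [newsOf, if_neg (by simpa using h), hadd]]
        rw [ih (q ++ [n]) (v ++ [n])]
        simp

-- 'while len(q) > 0: cur = q.pop(0); visitor(cur); for n in graph.get(cur, []): …'
def bfsLoop (graph : List (Int × List Int)) (U : Finset Int)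
    (hU : ∀ c x, x ∈ pvNbrs graph c → x ∈ U) (q : List Int) (visited : PySem.Set Int) :
    PySem.Set Int :=
  match q with
  | [] => visited
  | cur :: rest =>
      bfsLoop graph U hU (bfsPush (pvNbrs graph cur) rest visited).1
        (bfsPush (pvNbrs graph cur) rest visited).2
termination_by 2 * (U \ visited.toFinset).card + q.length
decreasing_by
  obtain ⟨hnd, hmem, hfr, _⟩ := newsOf_spec (pvNbrs graph cur) visited
  have hc := pvCardStep hnd hfr (fun x hx => hU cur x (hmem x hx))
  rw [List.toFinset_append] at hc
  simp [bfsPush_eq]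
  omega

def bfs (start : Int) (graph : List (Int × List Int)) : List Int :=
  bfsLoop graph (pvU graph) (pvNbrs_mem_U graph) [start]
    (PySem.Set.add PySem.Set.empty start)

-- ===== PORT B =====
-- everything one full rescan pass over the snapshot list discovers (termination bookkeeping
-- for fixLoop, cited in its decreasing_by)
def levelNews (graph : List (Int × List Int)) : List Int → PySem.Set Int → List Int
  | [], _ => []
  | cur :: f, v =>
      newsOf (pvNbrs graph cur) v ++
        levelNews graph f (v ++ newsOf (pvNbrs graph cur) v)

lemma levelNews_spec (graph : List (Int × List Int)) (f : List Int) : ∀ (v : PySem.Set Int),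
    (levelNews graph f v).Nodup ∧ (∀ x ∈ levelNews graph f v, x ∉ v) ∧
      (∀ x ∈ levelNews graph f v, ∃ c, x ∈ pvNbrs graph c) := by
  induction f with
  | nil => intro v; simp [levelNews]
  | cons cur f ih =>
      intro v
      obtain ⟨hnd1, hmem1, hfr1, _⟩ := newsOf_spec (pvNbrs graph cur) v
      obtain ⟨hnd2, hfr2, hsrc2⟩ := ih (v ++ newsOf (pvNbrs graph cur) v)
      refine ⟨?_, ?_, ?_⟩
      · exact List.Nodup.append hnd1 hnd2 (fun x hx1 hx2 => hfr2 x hx2 (by simp [hx1]))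
      · intro x hx hxv
        rcases List.mem_append.mp hx with hx | hx
        · exact hfr1 x hx hxv
        · exact hfr2 x hx (by simp [hxv])
      · intro x hx
        rcases List.mem_append.mp hx with hx | hx
        · exact ⟨cur, hmem1 x hx⟩
        · exact hsrc2 x hx

-- 'for n in graph.get(cur, []): if n not in seen: seen.add(n); order.append(n); changed = True'
def fixInner (ns : List Int) (order : List Int) (seen : PySem.Set Int) (changed : Bool) :
    List Int × PySem.Set Int × Bool :=
  match ns with
  | [] => (order, seen, changed)
  | n :: ns =>
      if PySem.Set.contains seen n then fixInner ns order seen changed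
      else fixInner ns (order ++ [n]) (PySem.Set.add seen n) true

lemma fixInner_eq (ns : List Int) : ∀ (order : List Int) (v : PySem.Set Int) (ch : Bool),
    fixInner ns order v ch =
      (order ++ newsOf ns v, v ++ newsOf ns v, ch || !(newsOf ns v).isEmpty) := by
  induction ns with
  | nil => intro order v ch; simp [fixInner, newsOf]
  | cons n ns ih =>
      intro order v ch
      by_cases h : n ∈ v
      · rw [show fixInner (n :: ns) order v ch = fixInner ns order v ch from by
              simp [fixInner, h],
            show newsOf (n :: ns) v = newsOf ns v from by simp [newsOf, h]]
        exact ih order v ch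
      · have hadd : PySem.Set.add v n = v ++ [n] := PySem.Set.add_of_not_mem h
        rw [show fixInner (n :: ns) order v ch = fixInner ns (order ++ [n]) (v ++ [n]) true from by
              simp [fixInner, h],
            show newsOf (n :: ns) v = n :: newsOf ns (v ++ [n]) from by rw [newsOf, if_neg (by simpa using h), hadd]]
        rw [ih (order ++ [n]) (v ++ [n]) true]
        simp

-- 'for cur in list(order): for n in graph.get(cur, []): …'  (pass over the snapshot)
def fixPass (graph : List (Int × List Int)) :
    List Int → List Int → PySem.Set Int → Bool → List Int × PySem.Set Int × Bool
  | [], order, seen, changed => (order, seen, changed)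
  | cur :: rest, order, seen, changed =>
      fixPass graph rest (fixInner (pvNbrs graph cur) order seen changed).1
        (fixInner (pvNbrs graph cur) order seen changed).2.1
        (fixInner (pvNbrs graph cur) order seen changed).2.2

lemma fixPass_eq (graph : List (Int × List Int)) (f : List Int) :
    ∀ (order : List Int) (v : PySem.Set Int) (ch : Bool),
    fixPass graph f order v ch =
      (order ++ levelNews graph f v, v ++ levelNews graph f v,
        ch || !(levelNews graph f v).isEmpty) := by
  induction f with
  | nil => intro order v ch; simp [fixPass, levelNews]
  | cons cur f ih =>
      intro order v ch
      simp only [fixPass, fixInner_eq, levelNews]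
      rw [ih]
      cases newsOf (pvNbrs graph cur) v <;> simp

-- 'while changed: changed = False; <one pass>'  (entered once since changed starts True)
def fixLoop (graph : List (Int × List Int)) (U : Finset Int)
    (hU : ∀ c x, x ∈ pvNbrs graph c → x ∈ U) (order : List Int) (seen : PySem.Set Int) :
    PySem.Set Int :=
  if (fixPass graph order order seen false).2.2 then
    fixLoop graph U hU (fixPass graph order order seen false).1
      (fixPass graph order order seen false).2.1
  else (fixPass graph order order seen false).2.1
termination_by (U \ seen.toFinset).card
decreasing_by
  rename_i h
  rw [fixPass_eq] at h ⊢
  obtain ⟨hnd, hfr, hsrc⟩ := levelNews_spec graph order seen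
  have hc := pvCardStep hnd hfr
    (fun x hx => by obtain ⟨c, hcx⟩ := hsrc x hx; exact hU c x hcx)
  rw [List.toFinset_append] at hc
  simp only [Bool.false_or] at h
  have hne : levelNews graph order seen ≠ [] := by
    intro hnil; rw [hnil] at h; simp at h
  have : 0 < (levelNews graph order seen).length := List.length_pos_iff.mpr hne
  simp
  omega

def bfs_alt (start : Int) (graph : List (Int × List Int)) : List Int :=
  fixLoop graph (pvU graph) (pvNbrs_mem_U graph) [start] (PySem.Set.ofList [start])

-- ===== PRECONDITION & SPEC =====
def Spec_bfs (start : Int) (graph : List (Int × List Int)) (out : List Int) : Prop := out = bfs_alt start graph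
instance (start : Int) (graph : List (Int × List Int)) (out : List Int) : Decidable (Spec_bfs start graph out) := by unfold Spec_bfs; infer_instance

-- ===== CLAIM (what is proved, stated in full; the proofs are below) =====
def Claim_equal_bfs : Prop := ∀ (start : Int) (graph : List (Int × List Int)), Dom_bfs start graph → Spec_bfs start graph (bfs start graph)

-- ===== LEMMAS AND PROOFS =====

-- a full pass over a node whose neighbors are all seen discovers nothing
lemma newsOf_nil_of_sub (ns : List Int) : ∀ (v : PySem.Set Int),
    (∀ n ∈ ns, n ∈ v) → newsOf ns v = [] := by
  induction ns with
  | nil => intro v _; rfl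
  | cons n ns ih =>
      intro v hsub
      rw [newsOf, if_pos (by simpa using hsub n List.mem_cons_self)]
      exact ih v (fun x hx => hsub x (List.mem_cons_of_mem _ hx))

lemma levelNews_append (graph : List (Int × List Int)) (a : List Int) :
    ∀ (b : List Int) (v : PySem.Set Int),
    levelNews graph (a ++ b) v =
      levelNews graph a v ++ levelNews graph b (v ++ levelNews graph a v) := by
  induction a with
  | nil => intro b v; simp [levelNews]
  | cons cur a ih =>
      intro b v
      simp only [List.cons_append, levelNews, ih, List.append_assoc]

-- rescanning already-saturated nodes discovers nothing
lemma levelNews_nil_of_sat (graph : List (Int × List Int)) (sat : List Int) :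
    ∀ (v : PySem.Set Int), (∀ c ∈ sat, ∀ n ∈ pvNbrs graph c, n ∈ v) →
    levelNews graph sat v = [] := by
  induction sat with
  | nil => intro v _; rfl
  | cons cur sat ih =>
      intro v hsat
      have h1 : newsOf (pvNbrs graph cur) v = [] :=
        newsOf_nil_of_sub _ v (hsat cur List.mem_cons_self)
      simp only [levelNews, h1, List.append_nil, List.nil_append]
      exact ih v (fun c hc => hsat c (List.mem_cons_of_mem _ hc))

-- after one pass, every neighbor of a frontier node is seen
lemma levelNews_cover (graph : List (Int × List Int)) (f : List Int) :
    ∀ (v : PySem.Set Int), ∀ c ∈ f, ∀ n ∈ pvNbrs graph c,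
      n ∈ v ++ levelNews graph f v := by
  induction f with
  | nil => intro v c hc; simp at hc
  | cons cur f ih =>
      intro v c hc n hn
      obtain ⟨_, _, _, hcov⟩ := newsOf_spec (pvNbrs graph cur) v
      simp only [levelNews, ← List.append_assoc]
      rcases List.mem_cons.mp hc with rfl | hc
      · exact List.mem_append.mpr (Or.inl (hcov n hn))
      · exact ih (v ++ newsOf (pvNbrs graph cur) v) c hc n hn

-- A's one-at-a-time queue, split as 'level ++ rest', advances by exactly one pass's discoveries
lemma bfsLoop_level (graph : List (Int × List Int)) (U : Finset Int)
    (hU : ∀ c x, x ∈ pvNbrs graph c → x ∈ U) (f : List Int) :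
    ∀ (rest : List Int) (v : PySem.Set Int),
    bfsLoop graph U hU (f ++ rest) v =
      bfsLoop graph U hU (rest ++ levelNews graph f v) (v ++ levelNews graph f v) := by
  induction f with
  | nil => intro rest v; simp [levelNews]
  | cons cur f ih =>
      intro rest v
      rw [List.cons_append]
      simp only [bfsLoop, bfsPush_eq]
      rw [List.append_assoc]
      rw [ih (rest ++ newsOf (pvNbrs graph cur) v) (v ++ newsOf (pvNbrs graph cur) v)]
      simp only [levelNews, List.append_assoc]

-- main bridge: A's queue loop on the frontier = B's rescan loop on saturated ++ frontier
lemma bfsLoop_eq_fixLoop (graph : List (Int × List Int)) (U : Finset Int)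
    (hU : ∀ c x, x ∈ pvNbrs graph c → x ∈ U) :
    ∀ (m : Nat) (sat f : List Int) (v : PySem.Set Int),
    (∀ c ∈ sat, ∀ n ∈ pvNbrs graph c, n ∈ v) → (U \ v.toFinset).card ≤ m →
    bfsLoop graph U hU f v = fixLoop graph U hU (sat ++ f) v := by
  intro m
  induction m with
  | zero =>
      intro sat f v hsat hle
      have hL : levelNews graph (sat ++ f) v = levelNews graph f v := by
        rw [levelNews_append, levelNews_nil_of_sat graph sat v hsat]; simp
      obtain ⟨hnd, hfr, hsrc⟩ := levelNews_spec graph f v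
      have hLnil : levelNews graph f v = [] := by
        cases hx : levelNews graph f v with
        | nil => rfl
        | cons x xs =>
            exfalso
            have hxm : x ∈ levelNews graph f v := by rw [hx]; exact List.mem_cons_self
            have hxU : x ∈ U := by
              obtain ⟨c, hcx⟩ := hsrc x hxm; exact hU c x hcx
            have : x ∈ U \ v.toFinset :=
              Finset.mem_sdiff.mpr ⟨hxU, fun hv => hfr x hxm (List.mem_toFinset.mp hv)⟩
            have := Finset.card_pos.mpr ⟨x, this⟩
            omega
      rw [fixLoop, fixPass_eq, hL, hLnil]
      simp only [List.isEmpty_nil, Bool.not_true, Bool.or_false, Bool.false_eq_true, if_false,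
        List.append_nil]
      have hA := bfsLoop_level graph U hU f [] v
      rw [List.append_nil, hLnil] at hA
      simpa [bfsLoop] using hA
  | succ m ih =>
      intro sat f v hsat hle
      have hL : levelNews graph (sat ++ f) v = levelNews graph f v := by
        rw [levelNews_append, levelNews_nil_of_sat graph sat v hsat]; simp
      obtain ⟨hnd, hfr, hsrc⟩ := levelNews_spec graph f v
      rw [fixLoop, fixPass_eq, hL]
      cases hLcase : levelNews graph f v with
      | nil =>
          simp only [List.isEmpty_nil, Bool.not_true, Bool.or_false, Bool.false_eq_true,
            if_false, List.append_nil]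
          have hA := bfsLoop_level graph U hU f [] v
          rw [List.append_nil, hLcase] at hA
          simpa [bfsLoop] using hA
      | cons x xs =>
          rw [← hLcase]
          have hne : levelNews graph f v ≠ [] := by rw [hLcase]; simp
          simp only [List.isEmpty_eq_false_iff.mpr hne, Bool.not_false, Bool.or_true, if_true]
          have hA := bfsLoop_level graph U hU f [] v
          rw [List.append_nil, List.nil_append] at hA
          rw [hA]
          have hsat' : ∀ c ∈ sat ++ f,
              ∀ n ∈ pvNbrs graph c, n ∈ v ++ levelNews graph f v := by
            intro c hc n hn
            rcases List.mem_append.mp hc with hc | hc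
            · exact List.mem_append.mpr (Or.inl (hsat c hc n hn))
            · exact levelNews_cover graph f v c hc n hn
          have hle' : (U \ (v ++ levelNews graph f v).toFinset).card ≤ m := by
            have hc := pvCardStep hnd hfr
              (fun x hx => by obtain ⟨c, hcx⟩ := hsrc x hx; exact hU c x hcx)
            have : 0 < (levelNews graph f v).length := by
              rw [hLcase]; simp
            omega
          have := ih (sat ++ f) (levelNews graph f v) (v ++ levelNews graph f v) hsat' hle'
          rw [this, List.append_assoc]

-- ===== VERDICT (by name: the statement is the Claim_ definition above) =====
theorem bfs_spec : Claim_equal_bfs := by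
  intro start graph _
  show bfs start graph = bfs_alt start graph
  unfold bfs bfs_alt
  have h0 : PySem.Set.ofList [start] = PySem.Set.add PySem.Set.empty start := rfl
  rw [h0]
  have h := bfsLoop_eq_fixLoop graph (pvU graph) (pvNbrs_mem_U graph)
    (pvU graph \ (PySem.Set.add PySem.Set.empty start).toFinset).card [] [start]
    (PySem.Set.add PySem.Set.empty start) (by simp) le_rfl
  simpa using h
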